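-- pv_equiv track=rewrite | github.com/Rishikesh9919/Python | Playfrair Cipher/PlayfairCipher.py | plaintextpair
-- ===== SOURCE A (Python) =====
-- def plaintextpair(plaintext):
--     plaintextpair = []
--     i = 0
--     while i < len(plaintext):
--         a = plaintext[i]
--         b = 'X' if (i + 1) == len(plaintext) else plaintext[i + 1]
--         if a != b:
--             plaintextpair.append(a + b)
--             i += 2
--         else:
--             plaintextpair.append(a + 'X')
--             i += 1
--     return plaintextpair
-- ===== SOURCE B (Python) =====
-- def plaintextpair(plaintext):
--     r = []
--     for c in plaintext:
--         if len(r) % 2 == 1 and r[-1] == c: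
--             r.append('X')
--             r.append(c)
--         else:
--             r.append(c)
--     if len(r) % 2 == 1:
--         r.append('X')
--     s = ''.join(r)
--     return [s[i:i+2] for i in range(0, len(s), 2)]
-- ===== Notes on version B (the rewrite author's own statement) =====
-- stated objective: alternative
-- what changed: Replaced A's variable-step index loop (consuming 1 or 2 input chars per emitted pair) by a two-phase build: a parity-driven single pass appending chars (with 'X' inserted before a repeated second-of-pair char) into a flat string, then padding and chunking it into digrams.
import Mathlib
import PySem

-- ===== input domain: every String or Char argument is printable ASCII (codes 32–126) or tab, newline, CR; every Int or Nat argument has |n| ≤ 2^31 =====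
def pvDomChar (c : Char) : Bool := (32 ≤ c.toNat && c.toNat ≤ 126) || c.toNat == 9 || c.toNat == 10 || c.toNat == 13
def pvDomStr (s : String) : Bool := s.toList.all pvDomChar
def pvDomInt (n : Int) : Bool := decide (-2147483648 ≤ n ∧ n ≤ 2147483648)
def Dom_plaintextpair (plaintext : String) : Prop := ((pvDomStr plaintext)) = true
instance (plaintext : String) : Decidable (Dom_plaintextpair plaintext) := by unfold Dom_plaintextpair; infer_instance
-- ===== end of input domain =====

-- B replaces A's variable-step index loop by a parity-driven flat build plus a chunking pass (alternative decomposition, same cost).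

-- ===== PORT A =====
-- A's while loop over index i, transcribed as recursion on the remaining characters:
-- at each step a = current char, b = next char or 'X' at the end; consume 2 chars if a ≠ b, else 1.
def pvALoop : List Char → List String
  | [] => []
  | [a] =>
    -- i + 1 == len: b = 'X'
    if a ≠ 'X' then [String.mk [a, 'X']] else [String.mk [a, 'X']]
  | a :: b :: rest =>
    if a ≠ b then String.mk [a, b] :: pvALoop rest
    else String.mk [a, 'X'] :: pvALoop (b :: rest)

def plaintextpair (plaintext : String) : List String := pvALoop plaintext.toList

-- ===== PORT B =====
-- phase 1 of Source B: forward pass building the flat char list r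
def pvBuild (r : List Char) : List Char → List Char
  | [] => r
  | c :: cs =>
    if r.length % 2 == 1 && r.getLast? == some c then
      pvBuild (r ++ ['X', c]) cs
    else
      pvBuild (r ++ [c]) cs

-- Source B: final odd-length padding with 'X'
def pvPad (r : List Char) : List Char := if r.length % 2 == 1 then r ++ ['X'] else r

-- phase 2 of Source B: [r[i:i+2] for i in range(0, len(r), 2)]
def pvChunk : List Char → List String
  | [] => []
  | [a] => [String.mk [a]]
  | a :: b :: rest => String.mk [a, b] :: pvChunk rest

def plaintextpair_alt (plaintext : String) : List String :=
  pvChunk (pvPad (pvBuild [] plaintext.toList))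

-- ===== PRECONDITION & SPEC =====
def Spec_plaintextpair (plaintext : String) (out : List String) : Prop := out = plaintextpair_alt plaintext
instance (plaintext : String) (out : List String) : Decidable (Spec_plaintextpair plaintext out) := by unfold Spec_plaintextpair; infer_instance

-- ===== CLAIM (what is proved, stated in full; the proofs are below) =====
def Claim_equal_plaintextpair : Prop := ∀ (plaintext : String), Dom_plaintextpair plaintext → Spec_plaintextpair plaintext (plaintextpair plaintext)

-- ===== LEMMAS AND PROOFS =====

-- building from an even-length prefix factors out the prefix
theorem pvBuild_even_prefix (cs : List Char) : ∀ (r s : List Char), r.length % 2 = 0 →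
    pvBuild (r ++ s) cs = r ++ pvBuild s cs := by
  induction cs with
  | nil => intro r s _; simp [pvBuild]
  | cons c cs ih =>
    intro r s hr
    by_cases hodd : s.length % 2 = 1
    · have hne : s ≠ [] := by intro h; subst h; simp at hodd
      have hlast : (r ++ s).getLast? = s.getLast? := List.getLast?_append_of_ne_nil _ hne
      have hlen : (r ++ s).length % 2 = 1 := by simp [List.length_append]; omega
      simp only [pvBuild, hlast, hlen, hodd]
      by_cases hc : s.getLast? = some c
      · simp only [hc]
        simpa [List.append_assoc] using ih r (s ++ ['X', c]) hr
      · have : (s.getLast? == some c) = false := by simpa using hc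
        simp only [this]
        simpa [List.append_assoc] using ih r (s ++ [c]) hr
    · have hlen : ((r ++ s).length % 2 == 1) = false := by
        simp [List.length_append]; omega
      have hlen2 : (s.length % 2 == 1) = false := by simp; omega
      simp only [pvBuild, hlen, hlen2, Bool.false_and, if_neg Bool.false_ne_true]
      simpa [List.append_assoc] using ih r (s ++ [c]) hr

theorem pvPad_even_prefix (r t : List Char) (hr : r.length % 2 = 0) :
    pvPad (r ++ t) = r ++ pvPad t := by
  unfold pvPad
  have : (r ++ t).length % 2 = t.length % 2 := by simp [List.length_append]; omega
  rw [this]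
  split <;> simp [List.append_assoc]

theorem pvMain : (cs : List Char) → pvChunk (pvPad (pvBuild [] cs)) = pvALoop cs
  | [] => by simp [pvBuild, pvPad, pvChunk, pvALoop]
  | [a] => by
    simp only [pvBuild, pvALoop]
    norm_num [pvPad, pvChunk]
  | a :: b :: rest => by
    have h2 : pvBuild [] (a :: b :: rest) = pvBuild [a] (b :: rest) := by
      simp [pvBuild]
    by_cases hab : a = b
    · subst hab
      have hstep : pvBuild [a] (a :: rest) = pvBuild ([a, 'X'] ++ [a]) rest := by
        simp [pvBuild]
      have hfac : pvBuild ([a, 'X'] ++ [a]) rest = [a, 'X'] ++ pvBuild [a] rest :=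
        pvBuild_even_prefix rest [a, 'X'] [a] (by simp)
      have hrestart : pvBuild [a] rest = pvBuild [] (a :: rest) := by
        simp [pvBuild]
      rw [h2, hstep, hfac, hrestart,
        pvPad_even_prefix [a, 'X'] _ (by simp)]
      have := pvMain (a :: rest)
      simp [pvChunk, pvALoop, this]
    · have hstep : pvBuild [a] (b :: rest) = pvBuild ([a, b] ++ []) rest := by
        simp [pvBuild, hab]
      have hfac : pvBuild ([a, b] ++ []) rest = [a, b] ++ pvBuild [] rest :=
        pvBuild_even_prefix rest [a, b] [] (by simp)
      rw [h2, hstep, hfac, pvPad_even_prefix [a, b] _ (by simp)]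
      have := pvMain rest
      simp [pvChunk, pvALoop, this, hab]
termination_by cs => cs.length

-- ===== VERDICT (by name: the statement is the Claim_ definition above) =====
theorem plaintextpair_spec : Claim_equal_plaintextpair := by
  intro plaintext _
  unfold Spec_plaintextpair
  simp [plaintextpair, plaintextpair_alt, pvMain]
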